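-- pv_equiv track=rewrite | github.com/richardnguyen0715/tgng.leet | collectDiamonds.py | collectDiamonds
-- ===== SOURCE A (Python) =====
-- def collectDiamonds(nums, start, end, height):
--
--     # Time: O(NLogN) , Suy Biến thì O(N^2)
--
--     if start == end:
--         return 1
--
--     if start > end:
--         return 0
--
--     # Tìm minIndex trong đoạn start
--     minIndex = start
--     for i in range(start + 1, end + 1):
--         if nums[i] < nums[minIndex]:
--             minIndex = i
--
--     verticalResult = end - start + 1 # Ăn theo cột -> thì ăn hết cột, ví dụ [1,3] -> ăn 3 cột
--     horizontalResult = nums[minIndex] - height # Ăn theo hàng thì ăn hết hàng tính từ thằng thấp nhất đến độ cao hiện tại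
--
--     # ăn xong hàng thì còn dư bên trái và phải của minIndex có cột cao hơn nó -> tính cho cột cao hơn nó.
--     leftResult = collectDiamonds(nums, start, minIndex - 1, nums[minIndex])
--     rightResult = collectDiamonds(nums, minIndex + 1, end, nums[minIndex])
--     horizontalResult = horizontalResult + leftResult + rightResult
--
--     return min(verticalResult, horizontalResult)
-- ===== SOURCE B (Python) =====
-- def _res(t, h):
--     # result of a finished subtree summary t = (m, s, c) when its parent height is h
--     if t is None:
--         return 0
--     m, s, c = t
--     return 1 if s == 1 else min(s, m - h + c)
--
--
-- def collectDiamonds(nums, start, end, height):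
--     # One left-to-right pass with a monotonic stack (Cartesian-tree build)
--     # instead of the argmin-scan recursion.
--     if start == end:
--         return 1
--     if start > end:
--         return 0
--     stack = []  # (value, size of left subtree, left+right contribution so far)
--     for v in nums[start:end + 1]:
--         last = None
--         while stack and stack[-1][0] > v:
--             m, sL, rL = stack.pop()
--             last = (m, 1 + sL + (last[1] if last else 0), rL + _res(last, m))
--         stack.append((v, last[1] if last else 0, _res(last, v)))
--     last = None
--     while stack:
--         m, sL, rL = stack.pop()
--         last = (m, 1 + sL + (last[1] if last else 0), rL + _res(last, m))
--     return _res(last, height)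
-- ===== Notes on version B (the rewrite author's own statement) =====
-- stated objective: alternative
-- what changed: Replaced the top-down argmin-scan recursion by a single left-to-right monotonic-stack (Cartesian-tree) pass that maintains (min, size, children-contribution) summaries and computes the same min(vertical,horizontal) value bottom-up.
-- outside the precondition, e.g. on collectDiamonds([5], -1, 0, 0): A returns 2, B returns 1
import Mathlib
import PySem

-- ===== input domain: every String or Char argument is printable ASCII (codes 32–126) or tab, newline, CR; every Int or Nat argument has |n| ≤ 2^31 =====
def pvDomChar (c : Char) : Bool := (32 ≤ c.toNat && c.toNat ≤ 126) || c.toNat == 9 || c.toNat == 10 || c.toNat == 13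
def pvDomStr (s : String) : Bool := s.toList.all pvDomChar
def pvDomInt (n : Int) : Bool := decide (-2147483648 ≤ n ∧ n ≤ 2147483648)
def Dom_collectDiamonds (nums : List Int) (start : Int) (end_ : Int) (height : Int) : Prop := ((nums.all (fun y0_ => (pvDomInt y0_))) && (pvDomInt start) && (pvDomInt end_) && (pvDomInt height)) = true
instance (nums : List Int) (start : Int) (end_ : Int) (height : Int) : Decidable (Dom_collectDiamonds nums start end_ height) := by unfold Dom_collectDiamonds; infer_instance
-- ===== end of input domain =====

-- B replaces A's argmin-scan recursion by a single monotonic-stack (Cartesian-tree) pass; same return value.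

-- ===== PORT A =====
-- the 'for i in range(start+1, end+1): if nums[i] < nums[minIndex]: minIndex = i' scan
def pvAScan (nums : List Int) (start end_ : Int) : Int :=
  (PySem.List.pyRange (start + 1) (end_ + 1) 1).foldl
    (fun mi i => if PySem.List.pyGetD nums i 0 < PySem.List.pyGetD nums mi 0 then i else mi) start

-- a fold that either keeps its state or picks a list element stays in {init} ∪ list (for termination)
theorem pvFoldlChoose_mem {α : Type} (q : α → α → Prop) [inst : ∀ a b, Decidable (q a b)]
    (l : List α) (a : α) :
    (l.foldl (fun mi i => if q mi i then i else mi) a) = a ∨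
      (l.foldl (fun mi i => if q mi i then i else mi) a) ∈ l := by
  induction l generalizing a with
  | nil => exact Or.inl rfl
  | cons x xs ih =>
    simp only [List.foldl_cons]
    rcases ih (if q a x then x else a) with h | h
    · rw [h]; split_ifs with hq
      · exact Or.inr (by simp)
      · exact Or.inl rfl
    · exact Or.inr (List.mem_cons_of_mem _ h)

theorem pvAScan_bounds (nums : List Int) (start end_ : Int) (h : start ≤ end_) :
    start ≤ pvAScan nums start end_ ∧ pvAScan nums start end_ ≤ end_ := by
  unfold pvAScan
  rcases pvFoldlChoose_mem (fun mi i => PySem.List.pyGetD nums i 0 < PySem.List.pyGetD nums mi 0)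
      (PySem.List.pyRange (start + 1) (end_ + 1) 1) start with hh | hh
  · rw [hh]; omega
  · rw [PySem.List.mem_pyRange_one] at hh; omega

def collectDiamonds (nums : List Int) (start : Int) (end_ : Int) (height : Int) : Int :=
  if start = end_ then 1
  else if start > end_ then 0
  else
    let minIndex := pvAScan nums start end_
    let verticalResult := end_ - start + 1
    let mv := PySem.List.pyGetD nums minIndex 0
    let leftResult := collectDiamonds nums start (minIndex - 1) mv
    let rightResult := collectDiamonds nums (minIndex + 1) end_ mv
    min verticalResult (mv - height + leftResult + rightResult)
termination_by (end_ - start + 1).toNat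
decreasing_by
  · have := pvAScan_bounds nums start end_ (by omega); omega
  · have := pvAScan_bounds nums start end_ (by omega); omega

-- ===== PORT B =====
-- result contributed by a finished subtree summary (m, s, c) under parent height h (Source B's _res)
def pvRes (t : Option (Int × Int × Int)) (h : Int) : Int :=
  match t with
  | none => 0
  | some (m, s, c) => if s = 1 then 1 else min s (m - h + c)

def pvSize (t : Option (Int × Int × Int)) : Int :=
  match t with
  | none => 0
  | some (_, s, _) => s

-- Source B's inner 'while stack and stack[-1][0] > v' pop loop (stack head = top)
def pvPopGT (v : Int) : List (Int × Int × Int) → Option (Int × Int × Int) →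
    List (Int × Int × Int) × Option (Int × Int × Int)
  | [], last => ([], last)
  | (m, sL, rL) :: rest, last =>
    if m > v then pvPopGT v rest (some (m, 1 + sL + pvSize last, rL + pvRes last m))
    else ((m, sL, rL) :: rest, last)

-- one iteration of Source B's 'for v in nums[start:end+1]' loop
def pvStep (stack : List (Int × Int × Int)) (v : Int) : List (Int × Int × Int) :=
  let (s', last) := pvPopGT v stack none
  (v, pvSize last, pvRes last v) :: s'

-- Source B's final 'while stack' drain
def pvPopAll : List (Int × Int × Int) → Option (Int × Int × Int) → Option (Int × Int × Int)
  | [], last => last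
  | (m, sL, rL) :: rest, last => pvPopAll rest (some (m, 1 + sL + pvSize last, rL + pvRes last m))

def collectDiamonds_alt (nums : List Int) (start : Int) (end_ : Int) (height : Int) : Int :=
  if start = end_ then 1
  else if start > end_ then 0
  else
    let seg := PySem.List.slice nums (some start) (some (end_ + 1))
    let stack := seg.foldl pvStep []
    pvRes (pvPopAll stack none) height

-- ===== PRECONDITION & SPEC =====
-- Pre_ excludes ranges with start < end_ that are not plain in-bounds ranges: there A indexes
-- nums out of range (IndexError) or, for a negative start, silently wraps around to the end of
-- the list — an accident of Python indexing.
def Pre_collectDiamonds (nums : List Int) (start : Int) (end_ : Int) (height : Int) : Prop :=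
  end_ ≤ start ∨ (0 ≤ start ∧ end_ < (nums.length : Int))

instance (nums : List Int) (start : Int) (end_ : Int) (height : Int) : Decidable (Pre_collectDiamonds nums start end_ height) := by unfold Pre_collectDiamonds; infer_instance

def pvWitness_collectDiamonds : List Int × Int × Int × Int := ([3, 1, 2], 0, 2, 0)

def Spec_collectDiamonds (nums : List Int) (start : Int) (end_ : Int) (height : Int) (out : Int) : Prop := out = collectDiamonds_alt nums start end_ height
instance (nums : List Int) (start : Int) (end_ : Int) (height : Int) (out : Int) : Decidable (Spec_collectDiamonds nums start end_ height out) := by unfold Spec_collectDiamonds; infer_instance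

-- ===== CLAIM (what is proved, stated in full; the proofs are below) =====
def Claim_equal_collectDiamonds : Prop := ∀ (nums : List Int) (start : Int) (end_ : Int) (height : Int), Dom_collectDiamonds nums start end_ height → Pre_collectDiamonds nums start end_ height → Spec_collectDiamonds nums start end_ height (collectDiamonds nums start end_ height)

-- ===== LEMMAS AND PROOFS =====

-- the common specification: summary (leftmost-min value, length, children contribution) of a segment
def pvSumm (xs : List Int) : Option (Int × Int × Int) :=
  match hm : xs.min? with
  | none => none
  | some m =>
    let j := xs.idxOf m
    some (m, (xs.length : Int),
      pvRes (pvSumm (xs.take j)) m + pvRes (pvSumm (xs.drop (j + 1))) m)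
termination_by xs.length
decreasing_by
  · have hmem : m ∈ xs := (List.min?_eq_some_iff.1 hm).1
    have := List.idxOf_lt_length_of_mem hmem
    simp; omega
  · have hmem : m ∈ xs := (List.min?_eq_some_iff.1 hm).1
    have := List.idxOf_lt_length_of_mem hmem
    simp; omega

def pvSeg (nums : List Int) (start end_ : Int) : List Int :=
  (nums.drop start.toNat).take (end_ - start + 1).toNat

theorem pvSumm_nil : pvSumm [] = none := by rw [pvSumm]; rfl

theorem pvSumm_split (u w : List Int) (m : Int) (hu : ∀ x ∈ u, m < x) (hw : ∀ x ∈ w, m ≤ x) :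
    pvSumm (u ++ m :: w) = some (m, ((u ++ m :: w).length : Int),
      pvRes (pvSumm u) m + pvRes (pvSumm w) m) := by
  have hmin : (u ++ m :: w).min? = some m := by
    rw [List.min?_eq_some_iff]
    constructor
    · simp
    · intro b hb
      rcases List.mem_append.1 hb with h | h
      · exact le_of_lt (hu b h)
      · rcases List.mem_cons.1 h with h | h
        · omega
        · exact hw b h
  have hnm : m ∉ u := fun hm => lt_irrefl m (hu m hm)
  have hidx : (u ++ m :: w).idxOf m = u.length := by
    rw [List.idxOf_append]
    simp [hnm]
  rw [pvSumm]
  split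
  · rename_i heq; rw [hmin] at heq; exact absurd heq (by simp)
  · rename_i m' heq
    rw [hmin] at heq
    injection heq with heq; subst heq
    rw [hidx]
    have ht : (u ++ m :: w).take u.length = u := List.take_left
    have hd : (u ++ m :: w).drop (u.length + 1) = w := by
      rw [show u.length + 1 = u.length + 1 from rfl, ← List.drop_drop]
      simp
    simp only []
    rw [ht, hd]

theorem pvSize_summ (xs : List Int) : pvSize (pvSumm xs) = (xs.length : Int) := by
  rw [pvSumm]
  split
  · rename_i heq
    rw [List.min?_eq_none_iff] at heq
    simp [heq, pvSize]
  · simp [pvSize]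

theorem pvSumm_singleton (x : Int) : pvSumm [x] = some (x, 1, 0) := by
  have := pvSumm_split [] [] x (by simp) (by simp)
  simpa [pvSumm_nil, pvRes] using this

theorem pvNotMemTakeIdxOf (xs : List Int) (m : Int) : m ∉ xs.take (xs.idxOf m) := by
  induction xs with
  | nil => simp
  | cons x xs ih =>
    by_cases hx : x = m
    · subst hx; simp
    · rw [List.idxOf_cons_ne _ hx]
      simp only [Nat.succ_eq_add_one, List.take_succ_cons, List.mem_cons]
      rintro (h | h)
      · exact hx h.symm
      · exact ih h

theorem pvSeg_length (nums : List Int) (start end_ : Int) (hs : 0 ≤ start)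
    (he : end_ < (nums.length : Int)) :
    (pvSeg nums start end_).length = (end_ - start + 1).toNat := by
  unfold pvSeg
  simp only [List.length_take, List.length_drop]
  omega

theorem pvSeg_get (nums : List Int) (start end_ : Int) (hs : 0 ≤ start)
    (he : end_ < (nums.length : Int)) (r : Nat) (hr : r < (end_ - start + 1).toNat) :
    PySem.List.pyGetD nums (start + (r : Int)) 0
      = (pvSeg nums start end_)[r]'(by rw [pvSeg_length nums start end_ hs he]; omega) := by
  rw [PySem.List.pyGetD_eq_getElem nums 0 (by omega) (by push_cast; omega)]
  unfold pvSeg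
  rw [List.getElem_take, List.getElem_drop]
  congr 1
  omega

theorem pvScan_prefix (nums : List Int) (start end_ : Int) (hs : 0 ≤ start)
    (hse : start ≤ end_) (he : end_ < (nums.length : Int)) :
    ∀ k : Nat, 1 ≤ k → k ≤ (end_ - start + 1).toNat →
    ∀ m, (((pvSeg nums start end_).take k).min? = some m) →
    (PySem.List.pyRange (start + 1) (start + (k : Int)) 1).foldl
        (fun mi i => if PySem.List.pyGetD nums i 0 < PySem.List.pyGetD nums mi 0 then i else mi)
        start
      = start + (((pvSeg nums start end_).take k).idxOf m : Int) := by
  set xs := pvSeg nums start end_ with hxs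
  have hlen : xs.length = (end_ - start + 1).toNat := pvSeg_length nums start end_ hs he
  intro k
  induction k with
  | zero => omega
  | succ k ih =>
    intro _ hk m hm
    by_cases hk0 : k = 0
    · subst hk0
      simp only [Nat.zero_add, Nat.cast_one] at hm ⊢
      have hrange : PySem.List.pyRange (start + 1) (start + (1 : Int)) 1 = [] := by
        simp [PySem.List.pyRange]
      have h0 : 0 < xs.length := by omega
      have htake : xs.take 1 = [xs[0]] := by
        rw [List.take_succ_eq_append_getElem h0]; simp
      rw [htake] at hm
      simp only [List.min?_singleton, Option.some.injEq] at hm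
      subst hm
      rw [hrange, htake]
      simp
    · have hk1 : 1 ≤ k := by omega
      have hkn : k < (end_ - start + 1).toNat := by omega
      have hklen : k < xs.length := by omega
      -- the prefix of length k has a minimum m'
      obtain ⟨m', hm'⟩ : ∃ m', (xs.take k).min? = some m' := by
        cases hmin : (xs.take k).min? with
        | none =>
          rw [List.min?_eq_none_iff] at hmin
          have : (xs.take k).length = k := by simp [List.length_take]; omega
          rw [hmin] at this; simp at this; omega
        | some m' => exact ⟨m', rfl⟩
      have ihk := ih hk1 (by omega) m' hm'
      have hm'mem : m' ∈ xs.take k := (List.min?_eq_some_iff.1 hm').1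
      have hm'min : ∀ b ∈ xs.take k, m' ≤ b := (List.min?_eq_some_iff.1 hm').2
      set j := (xs.take k).idxOf m' with hj
      have hjk : j < k := by
        have h' := List.idxOf_lt_length_of_mem hm'mem
        simp only [List.length_take] at h'
        omega
      have hxj : xs[j]'(by omega) = m' := by
        have h1 : (xs.take k)[j]'(by simp [List.length_take]; omega) = m' :=
          List.getElem_idxOf (List.idxOf_lt_length_of_mem hm'mem)
        rw [List.getElem_take] at h1
        exact h1
      -- split the range at its last element start+k
      have hsplit : PySem.List.pyRange (start + 1) (start + ((k : Int) + 1)) 1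
          = PySem.List.pyRange (start + 1) (start + (k : Int)) 1 ++ [start + (k : Int)] := by
        rw [show start + ((k : Int) + 1) = (start + (k : Int)) + 1 by ring]
        exact PySem.List.pyRange_one_succ_right (by omega)
      have hacc_k : PySem.List.pyGetD nums (start + (k : Int)) 0 = xs[k]'hklen :=
        pvSeg_get nums start end_ hs he k hkn
      have hacc_j : PySem.List.pyGetD nums (start + (j : Int)) 0 = xs[j]'(by omega) :=
        pvSeg_get nums start end_ hs he j (by omega)
      have htake1 : xs.take (k + 1) = xs.take k ++ [xs[k]'hklen] :=
        List.take_succ_eq_append_getElem hklen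
      push_cast
      rw [hsplit, List.foldl_append, ihk]
      simp only [List.foldl_cons, List.foldl_nil]
      rw [hacc_k, hacc_j, hxj]
      by_cases hlt : xs[k]'hklen < m'
      · -- the new element is the strict minimum: index moves to k
        have hmv : (xs.take (k + 1)).min? = some (xs[k]'hklen) := by
          rw [htake1, List.min?_eq_some_iff]
          constructor
          · exact List.mem_append_right _ (by simp)
          · intro b hb
            rcases List.mem_append.1 hb with h | h
            · have := hm'min b h; omega
            · simp at h; omega
        rw [hmv] at hm; injection hm with hm; subst hm
        have hnmem : xs[k]'hklen ∉ xs.take k := by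
          intro hmem
          have := hm'min _ hmem; omega
        rw [if_pos hlt, htake1, List.idxOf_append]
        simp [hnmem, List.length_take]
        omega
      · -- the old minimum m' survives; index j is kept
        have hmv : (xs.take (k + 1)).min? = some m' := by
          rw [htake1, List.min?_eq_some_iff]
          constructor
          · exact List.mem_append.2 (Or.inl hm'mem)
          · intro b hb
            rcases List.mem_append.1 hb with h | h
            · exact hm'min b h
            · simp at h; omega
        rw [hmv] at hm; injection hm with hm; subst hm
        rw [if_neg hlt, htake1, List.idxOf_append]
        simp [hm'mem]
        exact hj

theorem pvA_eq (nums : List Int) : ∀ n (start end_ h : Int), (end_ - start + 1).toNat = n →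
    0 ≤ start → end_ < (nums.length : Int) →
    collectDiamonds nums start end_ h = pvRes (pvSumm (pvSeg nums start end_)) h := by
  intro n
  induction n using Nat.strong_induction_on with
  | _ n ihn =>
    intro start end_ h hn hs he
    by_cases h1 : start = end_
    · subst h1
      have hlt : start.toNat < nums.length := by omega
      have hseg : pvSeg nums start start = [nums[start.toNat]'hlt] := by
        unfold pvSeg
        rw [show (start - start + 1).toNat = 1 by omega]
        rw [List.take_succ_eq_append_getElem (by simp only [List.length_drop]; omega)]
        simp
      rw [collectDiamonds]
      simp [hseg, pvSumm_singleton, pvRes]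
    · by_cases h2 : start > end_
      · have hseg : pvSeg nums start end_ = [] := by
          unfold pvSeg
          rw [show (end_ - start + 1).toNat = 0 by omega]
          simp
        rw [collectDiamonds]
        simp [h1, h2, hseg, pvSumm_nil, pvRes]
      · have hlt : start < end_ := by omega
        set xs := pvSeg nums start end_ with hxs
        have hlen : xs.length = (end_ - start + 1).toNat := pvSeg_length nums start end_ hs he
        have hnn : 2 ≤ (end_ - start + 1).toNat := by omega
        obtain ⟨m, hm⟩ : ∃ m, xs.min? = some m := by
          cases hmin : xs.min? with
          | none => rw [List.min?_eq_none_iff] at hmin; rw [hmin] at hlen; simp at hlen; omega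
          | some m => exact ⟨m, rfl⟩
        have htakeall : xs.take (end_ - start + 1).toNat = xs :=
          List.take_of_length_le (by omega)
        have hscan : pvAScan nums start end_ = start + ((xs.idxOf m : Nat) : Int) := by
          unfold pvAScan
          have := pvScan_prefix nums start end_ hs (by omega) he
            (end_ - start + 1).toNat (by omega) le_rfl m (by rw [htakeall]; exact hm)
          rw [htakeall] at this
          rw [show (end_ : Int) + 1 = start + ((end_ - start + 1).toNat : Int) by omega]
          exact this
        set j := xs.idxOf m with hj
        have hmmem : m ∈ xs := (List.min?_eq_some_iff.1 hm).1
        have hmmin : ∀ b ∈ xs, m ≤ b := (List.min?_eq_some_iff.1 hm).2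
        have hjlen : j < xs.length := List.idxOf_lt_length_of_mem hmmem
        have hxj : xs[j]'hjlen = m := List.getElem_idxOf hjlen
        have hmv : PySem.List.pyGetD nums (start + (j : Int)) 0 = m := by
          rw [pvSeg_get nums start end_ hs he j (by omega)]
          exact hxj
        -- decomposition xs = u ++ m :: w at the leftmost minimum
        set u := xs.take j with hu
        set w := xs.drop (j + 1) with hw
        have hdecomp : xs = u ++ m :: w := by
          rw [hu, hw, ← hxj]
          rw [← List.drop_eq_getElem_cons hjlen]
          exact (List.take_append_drop j xs).symm
        have hu_gt : ∀ x ∈ u, m < x := by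
          intro x hx
          have hge : m ≤ x := hmmin x (List.mem_of_mem_take hx)
          rcases lt_or_eq_of_le hge with h | h
          · exact h
          · exfalso; rw [← h] at hx; exact pvNotMemTakeIdxOf xs m hx
        have hw_ge : ∀ x ∈ w, m ≤ x := fun x hx => hmmin x (List.mem_of_mem_drop hx)
        -- the two recursive segments are exactly u and w
        have hleft : pvSeg nums start (start + (j : Int) - 1) = u := by
          rw [hu, hxs]
          unfold pvSeg
          rw [List.take_take]
          congr 1
          omega
        have hright : pvSeg nums (start + (j : Int) + 1) end_ = w := by
          rw [hw, hxs]
          unfold pvSeg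
          rw [List.drop_take, List.drop_drop]
          rw [show start.toNat + (j + 1) = (start + (j : Int) + 1).toNat by omega]
          congr 1
          omega
        have hIHl := ihn (start + (j : Int) - 1 - start + 1).toNat (by omega)
          start (start + (j : Int) - 1) m rfl hs (by omega)
        have hIHr := ihn (end_ - (start + (j : Int) + 1) + 1).toNat (by omega)
          (start + (j : Int) + 1) end_ m rfl (by omega) he
        rw [hleft] at hIHl
        rw [hright] at hIHr
        -- unfold one step of A
        rw [collectDiamonds]
        simp only [if_neg h1, if_neg h2]
        rw [hscan, hmv, hIHl, hIHr]
        -- and one step of the summary on the B side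
        rw [hdecomp, pvSumm_split u w m hu_gt hw_ge, ← hdecomp]
        simp only [pvRes]
        rw [if_neg (by omega : ¬ ((xs.length : Int) = 1))]
        rw [hlen]
        congr 1
        · omega
        · ring

-- stack invariant of B's pass: the stack (head = top) summarises a decomposition of the prefix read so far
inductive pvInv : List (Int × Int × Int) → List Int → Prop
  | nil : pvInv [] []
  | cons (s : List (Int × Int × Int)) (p u : List Int) (m : Int) :
      pvInv s p → (∀ x ∈ u, m < x) →
      (∀ t ∈ s.head?, t.1 ≤ m) →
      pvInv ((m, (u.length : Int), pvRes (pvSumm u) m) :: s) (p ++ u ++ [m])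

theorem pvPopAll_eq : ∀ (s : List (Int × Int × Int)) (p : List Int), pvInv s p →
    ∀ w : List Int, (∀ x ∈ w, ∀ t ∈ s.head?, t.1 ≤ x) →
    pvPopAll s (pvSumm w) = pvSumm (p ++ w) := by
  intro s p hinv
  induction hinv with
  | nil => intro w _; simp [pvPopAll]
  | cons s p u m hs hu hchain ih =>
    intro w hw
    have hwm : ∀ x ∈ w, m ≤ x := by
      intro x hx
      exact hw x hx (m, (u.length : Int), pvRes (pvSumm u) m) (by simp)
    have hmerge : (some (m, 1 + (u.length : Int) + pvSize (pvSumm w),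
        pvRes (pvSumm u) m + pvRes (pvSumm w) m)) = pvSumm (u ++ m :: w) := by
      rw [pvSumm_split u w m hu hwm, pvSize_summ]
      simp
      push_cast; ring
    rw [pvPopAll, hmerge, ih (u ++ m :: w) ?_]
    · simp
    · intro x hx t ht
      have hm_t : t.1 ≤ m := hchain t ht
      rcases List.mem_append.1 hx with h | h
      · exact le_trans hm_t (le_of_lt (hu x h))
      · rcases List.mem_cons.1 h with h | h
        · omega
        · exact le_trans hm_t (hwm x h)

theorem pvPopGT_eq : ∀ (s : List (Int × Int × Int)) (p : List Int), pvInv s p →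
    ∀ (v : Int) (w : List Int), (∀ x ∈ w, v < x) → (∀ x ∈ w, ∀ t ∈ s.head?, t.1 ≤ x) →
    ∃ (s₂ : List (Int × Int × Int)) (p₂ w₂ : List Int),
      pvPopGT v s (pvSumm w) = (s₂, pvSumm w₂) ∧ pvInv s₂ p₂ ∧ p ++ w = p₂ ++ w₂ ∧
      (∀ x ∈ w₂, v < x) ∧ (∀ t ∈ s₂.head?, t.1 ≤ v) := by
  intro s p hinv
  induction hinv with
  | nil =>
    intro v w hv _
    exact ⟨[], [], w, by simp [pvPopGT], pvInv.nil, by simp, hv, by simp⟩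
  | cons s p u m hs hu hchain ih =>
    intro v w hv hw
    by_cases hm : m > v
    · have hwm : ∀ x ∈ w, m ≤ x := fun x hx =>
        hw x hx (m, (u.length : Int), pvRes (pvSumm u) m) (by simp)
      have hmerge : (some (m, 1 + (u.length : Int) + pvSize (pvSumm w),
          pvRes (pvSumm u) m + pvRes (pvSumm w) m)) = pvSumm (u ++ m :: w) := by
        rw [pvSumm_split u w m hu hwm, pvSize_summ]
        simp
        push_cast; ring
      have hv' : ∀ x ∈ u ++ m :: w, v < x := by
        intro x hx
        rcases List.mem_append.1 hx with h | h
        · exact lt_trans hm (hu x h)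
        · rcases List.mem_cons.1 h with h | h
          · omega
          · exact lt_of_lt_of_le hm (hwm x h)
      have hch' : ∀ x ∈ u ++ m :: w, ∀ t ∈ s.head?, t.1 ≤ x := by
        intro x hx t ht
        have hm_t : t.1 ≤ m := hchain t ht
        rcases List.mem_append.1 hx with h | h
        · exact le_trans hm_t (le_of_lt (hu x h))
        · rcases List.mem_cons.1 h with h | h
          · omega
          · exact le_trans hm_t (hwm x h)
      obtain ⟨s₂, p₂, w₂, heq, hinv₂, hp₂, hv₂, hh₂⟩ := ih v (u ++ m :: w) hv' hch'
      refine ⟨s₂, p₂, w₂, ?_, hinv₂, ?_, hv₂, hh₂⟩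
      · rw [pvPopGT, if_pos hm, hmerge]; exact heq
      · rw [← hp₂]; simp
    · refine ⟨(m, (u.length : Int), pvRes (pvSumm u) m) :: s, p ++ u ++ [m], w,
        ?_, pvInv.cons s p u m hs hu hchain, rfl, hv, ?_⟩
      · rw [pvPopGT, if_neg hm]
      · intro t ht; simp at ht; subst ht; simpa using hm

theorem pvStep_inv (s : List (Int × Int × Int)) (p : List Int) (hs : pvInv s p) (v : Int) :
    pvInv (pvStep s v) (p ++ [v]) := by
  obtain ⟨s₂, p₂, w₂, heq, hinv₂, hp₂, hv₂, hh₂⟩ :=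
    pvPopGT_eq s p hs v [] (by simp) (by simp)
  rw [pvSumm_nil] at heq
  unfold pvStep
  rw [heq]
  simp only []
  rw [pvSize_summ]
  have : p ++ [v] = p₂ ++ w₂ ++ [v] := by rw [← hp₂]; simp
  rw [this]
  exact pvInv.cons s₂ p₂ w₂ v hinv₂ hv₂ hh₂

theorem pvFoldl_inv (l : List Int) : ∀ (s : List (Int × Int × Int)) (p : List Int),
    pvInv s p → pvInv (l.foldl pvStep s) (p ++ l) := by
  induction l with
  | nil => intro s p hs; simpa using hs
  | cons x xs ih =>
    intro s p hs
    have := ih (pvStep s x) (p ++ [x]) (pvStep_inv s p hs x)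
    simpa using this

theorem pvB_eq (seg : List Int) (h : Int) :
    pvRes (pvPopAll (seg.foldl pvStep []) none) h = pvRes (pvSumm seg) h := by
  have hinv : pvInv (seg.foldl pvStep []) seg := by
    have := pvFoldl_inv seg [] [] pvInv.nil
    simpa using this
  have := pvPopAll_eq (seg.foldl pvStep []) seg hinv [] (by simp)
  rw [pvSumm_nil] at this
  rw [this]
  simp

-- ===== VERDICT (by name: the statement is the Claim_ definition above) =====
theorem collectDiamonds_spec : Claim_equal_collectDiamonds := by
  intro nums start end_ height _hd hpre
  unfold Spec_collectDiamonds
  by_cases h1 : start = end_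
  · rw [collectDiamonds, collectDiamonds_alt]; simp [h1]
  · by_cases h2 : start > end_
    · rw [collectDiamonds, collectDiamonds_alt]; simp [h1, h2]
    · have hlt : start < end_ := by omega
      rcases hpre with h | ⟨hs, he⟩
      · omega
      · have hA := pvA_eq nums (end_ - start + 1).toNat start end_ height rfl hs he
        rw [hA]
        rw [collectDiamonds_alt]
        simp only [if_neg h1, if_neg h2]
        rw [PySem.List.slice_toNat nums hs (by omega)]
        have hseg : (nums.drop start.toNat).take ((end_ + 1).toNat - start.toNat)
            = pvSeg nums start end_ := by
          unfold pvSeg; congr 1; omega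
        rw [hseg, pvB_eq]
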